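-- pv_equiv track=rewrite | github.com/shocola0624/python_modules | module03/ex3/ft_achievement_tracker.py | ultra_rare_achs
-- ===== SOURCE A (Python) =====
-- def ultra_rare_achs(players: list[set[str]]) -> set:
--     """Returns the ultra-rare achievements."""
--     rare = set()
--     for i, player1 in enumerate(players):
--         for j, player2 in enumerate(players):
--             if i != j:
--                 player1 = player1.difference(player2)
--         rare = rare.union(player1)
--     return rare
-- ===== SOURCE B (Python) =====
-- def ultra_rare_achs(players: list[set[str]]) -> set:
--     """Returns the ultra-rare achievements: one streaming pass, two maintained sets."""
--     once = set()
--     many = set()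
--     for player in players:
--         for ach in player:
--             if ach in many:
--                 pass
--             elif ach in once:
--                 once.discard(ach)
--                 many.add(ach)
--             else:
--                 once.add(ach)
--     return once
-- ===== Notes on version B (the rewrite author's own statement) =====
-- stated objective: faster
-- what changed: Replaced the quadratic all-pairs set-difference loops with a single streaming pass over all achievements that maintains two sets, `once` (seen exactly once so far) and `many` (seen at least twice), returning `once`.
import Mathlib
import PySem

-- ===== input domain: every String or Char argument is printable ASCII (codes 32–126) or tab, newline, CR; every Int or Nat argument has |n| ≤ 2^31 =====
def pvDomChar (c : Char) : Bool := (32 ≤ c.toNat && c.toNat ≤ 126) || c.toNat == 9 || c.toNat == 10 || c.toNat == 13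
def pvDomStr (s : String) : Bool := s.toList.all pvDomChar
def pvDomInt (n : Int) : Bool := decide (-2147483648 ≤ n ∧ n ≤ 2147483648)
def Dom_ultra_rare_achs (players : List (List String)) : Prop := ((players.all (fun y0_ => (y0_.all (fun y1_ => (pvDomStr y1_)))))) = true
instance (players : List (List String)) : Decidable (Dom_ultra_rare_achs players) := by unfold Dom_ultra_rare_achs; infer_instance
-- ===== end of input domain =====

-- B replaces A's quadratic nested set-difference loops by one streaming pass that maintains
-- two sets (seen-once / seen-at-least-twice); asymptotically faster.

-- ===== PORT A =====
def ultra_rare_achs (players : List (List String)) : List String :=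
  (PySem.List.enumerate players).foldl
    (fun rare ip =>
      PySem.Set.union rare
        ((PySem.List.enumerate players).foldl
          (fun p1 jp => if ip.1 ≠ jp.1 then PySem.Set.diff p1 jp.2 else p1)
          ip.2))
    PySem.Set.empty

-- ===== PORT B =====
def ultra_rare_achs_alt (players : List (List String)) : List String :=
  (players.foldl
    (fun (st : PySem.Set String × PySem.Set String) player =>
      player.foldl
        (fun (st : PySem.Set String × PySem.Set String) ach =>
          if PySem.Set.contains st.2 ach then st
          else if PySem.Set.contains st.1 ach then
            (PySem.Set.discard st.1 ach, PySem.Set.add st.2 ach)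
          else (PySem.Set.add st.1 ach, st.2))
        st)
    (PySem.Set.empty, PySem.Set.empty)).1

-- ===== PRECONDITION & SPEC =====
-- Each parameter element is a Python set[str]; its List String model therefore holds
-- distinct elements — Pre_ states exactly that (no input A accepts is excluded).
def Pre_ultra_rare_achs (players : List (List String)) : Prop :=
  ∀ p ∈ players, p.Nodup
instance (players : List (List String)) : Decidable (Pre_ultra_rare_achs players) := by
  unfold Pre_ultra_rare_achs; infer_instance
def pvWitness_ultra_rare_achs : List (List String) := [["a", "b"], ["b", "c"]]

def Spec_ultra_rare_achs (players : List (List String)) (out : List String) : Prop := out = ultra_rare_achs_alt players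
instance (players : List (List String)) (out : List String) : Decidable (Spec_ultra_rare_achs players out) := by unfold Spec_ultra_rare_achs; infer_instance

-- ===== CLAIM (what is proved, stated in full; the proofs are below) =====
def Claim_equal_ultra_rare_achs : Prop := ∀ (players : List (List String)), Dom_ultra_rare_achs players → Pre_ultra_rare_achs players → Spec_ultra_rare_achs players (ultra_rare_achs players)

-- ===== LEMMAS AND PROOFS =====

-- The common value both ports are shown to equal: the achievements occurring in exactly
-- one player, in traversal order.
def uraTarget (players : List (List String)) : List String :=
  players.flatten.filter (fun x => players.flatten.count x == 1)

-- ---- B side ----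

def uraStep (st : PySem.Set String × PySem.Set String) (ach : String) :
    PySem.Set String × PySem.Set String :=
  if PySem.Set.contains st.2 ach then st
  else if PySem.Set.contains st.1 ach then
    (PySem.Set.discard st.1 ach, PySem.Set.add st.2 ach)
  else (PySem.Set.add st.1 ach, st.2)

theorem count_append_singleton (S : List String) (a x : String) :
    (S ++ [a]).count x = S.count x + if x = a then 1 else 0 := by
  rcases eq_or_ne x a with rfl | h
  · simp [List.count_append]
  · simp [List.count_append, h, Ne.symm h]

theorem uraStep_invariant (S : List String) :
    (S.foldl uraStep (PySem.Set.empty, PySem.Set.empty)).1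
      = S.filter (fun x => S.count x == 1) ∧
    ∀ x, x ∈ (S.foldl uraStep (PySem.Set.empty, PySem.Set.empty)).2 ↔ 2 ≤ S.count x := by
  induction S using List.reverseRecOn with
  | nil => exact ⟨rfl, by intro x; simp [PySem.Set.empty]⟩
  | append_singleton S a ih =>
    obtain ⟨h1, h2⟩ := ih
    rw [List.foldl_append, List.foldl_cons, List.foldl_nil]
    by_cases hm : 2 ≤ S.count a
    · have hc : PySem.Set.contains (S.foldl uraStep (PySem.Set.empty, PySem.Set.empty)).2 a = true := by
        rw [PySem.Set.contains_iff]; exact (h2 a).mpr hm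
      rw [uraStep, hc]
      simp only [if_true]
      constructor
      · rw [h1, List.filter_append]
        have hfa : [a].filter (fun x => (S ++ [a]).count x == 1) = [] := by
          rw [List.filter_singleton]
          have : ((S ++ [a]).count a == 1) = false := by
            rw [count_append_singleton]; simp; omega
          rw [this]; rfl
        rw [hfa, List.append_nil]
        apply List.filter_congr; intro x hx
        rcases eq_or_ne x a with rfl | he
        · rw [Bool.eq_iff_iff]; simp [count_append_singleton]; omega
        · simp [count_append_singleton, List.count_singleton, he, Ne.symm he]
      · intro x
        rcases eq_or_ne x a with rfl | he
        · rw [h2 _, count_append_singleton]; simp only [eq_self_iff_true, if_true]; constructor <;> intro <;> omega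
        · rw [h2 x, count_append_singleton]; simp [he]
    · by_cases ho : S.count a = 1
      · have hc2 : PySem.Set.contains (S.foldl uraStep (PySem.Set.empty, PySem.Set.empty)).2 a = false := by
          rw [← Bool.not_eq_true, PySem.Set.contains_iff, h2 a]; omega
        have hc1 : PySem.Set.contains (S.foldl uraStep (PySem.Set.empty, PySem.Set.empty)).1 a = true := by
          rw [PySem.Set.contains_iff, h1, List.mem_filter]
          refine ⟨List.count_pos_iff.mp (by omega), by simp [ho]⟩
        rw [uraStep, hc2, hc1]
        simp only [Bool.false_eq_true, if_false, if_true]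
        constructor
        · rw [h1]
          rw [show PySem.Set.discard (S.filter (fun x => S.count x == 1)) a
                = (S.filter (fun x => S.count x == 1)).filter (fun y => !(y == a)) from rfl]
          rw [List.filter_filter, List.filter_append]
          have hfa : [a].filter (fun x => (S ++ [a]).count x == 1) = [] := by
            rw [List.filter_singleton]
            have : ((S ++ [a]).count a == 1) = false := by
              rw [count_append_singleton]; simp; omega
            rw [this]; rfl
          rw [hfa, List.append_nil]
          apply (List.filter_congr ?_).symm
          intro x hx
          rcases eq_or_ne x a with rfl | he
          · rw [Bool.eq_iff_iff]; simp [count_append_singleton]; omega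
          · simp [count_append_singleton, List.count_singleton, he, Ne.symm he]
        · intro x
          rcases eq_or_ne x a with rfl | he
          · rw [PySem.Set.mem_add, h2 _, count_append_singleton]
            simp only [eq_self_iff_true, if_true, or_true, true_iff]
            omega
          · rw [PySem.Set.mem_add, h2 x, count_append_singleton]; simp [he]
      · have hz : S.count a = 0 := by omega
        have hc2 : PySem.Set.contains (S.foldl uraStep (PySem.Set.empty, PySem.Set.empty)).2 a = false := by
          rw [← Bool.not_eq_true, PySem.Set.contains_iff, h2 a]; omega
        have hna : a ∉ S.filter (fun x => S.count x == 1) := by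
          rw [← h1]
          intro h'
          have := List.count_pos_iff.mpr (List.mem_of_mem_filter (h1 ▸ h'))
          omega
        have hc1 : PySem.Set.contains (S.foldl uraStep (PySem.Set.empty, PySem.Set.empty)).1 a = false := by
          rw [← Bool.not_eq_true, PySem.Set.contains_iff]
          rw [h1]; exact fun h' => hna (h1 ▸ h')
        rw [uraStep, hc2, hc1]
        simp only [Bool.false_eq_true, if_false]
        constructor
        · rw [h1, PySem.Set.add_of_not_mem (h1 ▸ hna : a ∉ _), List.filter_append]
          have hfa : [a].filter (fun x => (S ++ [a]).count x == 1) = [a] := by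
            rw [List.filter_singleton]
            have : ((S ++ [a]).count a == 1) = true := by
              rw [count_append_singleton]; simp; omega
            rw [this]; rfl
          rw [hfa]
          congr 1
          apply (List.filter_congr ?_).symm
          intro x hx
          rcases eq_or_ne x a with rfl | he
          · exact absurd hx (List.count_eq_zero.mp hz)
          · simp [count_append_singleton, List.count_singleton, he, Ne.symm he]
        · intro x
          rcases eq_or_ne x a with rfl | he
          · rw [h2 _, count_append_singleton]; simp only [eq_self_iff_true, if_true]; constructor <;> intro <;> omega
          · rw [h2 x, count_append_singleton]; simp [he]

theorem alt_eq_target (players : List (List String)) :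
    ultra_rare_achs_alt players = uraTarget players := by
  have : ultra_rare_achs_alt players
      = (players.flatten.foldl uraStep (PySem.Set.empty, PySem.Set.empty)).1 := by
    rw [ultra_rare_achs_alt, List.foldl_flatten]; rfl
  rw [this, (uraStep_invariant players.flatten).1, uraTarget]

-- ---- A side ----

def uraPred (players : List (List String)) (i : Int) (x : String) : Bool :=
  (PySem.List.enumerate players 0).all (fun jq => i == jq.1 || !(PySem.Set.contains jq.2 x))

def uraResid (players : List (List String)) (i : Int) (p : List String) : List String :=
  p.filter (uraPred players i)

theorem ura_inner_fold (players : List (List String)) (i : Int)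
    (pairs : List (Int × List String)) (s : List String) :
    pairs.foldl (fun p1 jp => if i ≠ jp.1 then PySem.Set.diff p1 jp.2 else p1) s
      = s.filter (fun x => pairs.all (fun jq => i == jq.1 || !(PySem.Set.contains jq.2 x))) := by
  induction pairs generalizing s with
  | nil => simp
  | cons jp rest ih =>
    rw [List.foldl_cons, ih]
    by_cases h : i = jp.1
    · rw [if_neg (by simp [h])]
      apply List.filter_congr; intro x hx
      simp [List.all_cons, h]
    · rw [if_pos h]
      rw [show PySem.Set.diff s jp.2 = s.filter (fun a => !(PySem.Set.contains jp.2 a)) from rfl]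
      rw [List.filter_filter]
      apply List.filter_congr; intro x hx
      rw [Bool.eq_iff_iff]
      simp [List.all_cons, h]
      tauto

theorem ura_resid_disjoint (players : List (List String)) (j j' : Int) (q q' : List String)
    (hj' : (j', q') ∈ PySem.List.enumerate players 0) (hne : j ≠ j') (x : String)
    (hx : x ∈ uraResid players j q) : x ∉ uraResid players j' q' := by
  intro hx'
  have hxq' : x ∈ q' := List.mem_of_mem_filter hx'
  obtain ⟨-, hpred⟩ := List.mem_filter.mp hx
  have h2 := List.all_eq_true.mp hpred (j', q') hj'
  rcases Bool.or_eq_true_iff.mp h2 with h3 | h3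
  · exact hne (by simpa using h3)
  · exact (by simpa using h3 : x ∉ q') hxq'

theorem ura_outer_fold (players : List (List String)) (h : ∀ p ∈ players, p.Nodup) :
    ∀ (pairs : List (Int × List String)) (rare : List String),
    (∀ jq ∈ pairs, jq ∈ PySem.List.enumerate players 0) →
    List.Pairwise (fun a b => a.1 ≠ b.1) pairs →
    rare.Nodup →
    (∀ x ∈ rare, ∀ jq ∈ pairs, x ∉ uraResid players jq.1 jq.2) →
    pairs.foldl (fun rare ip => PySem.Set.union rare (uraResid players ip.1 ip.2)) rare
      = rare ++ pairs.flatMap (fun jq => uraResid players jq.1 jq.2) := by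
  intro pairs
  induction pairs with
  | nil => intro rare _ _ _ _; simp
  | cons jp rest ih =>
    intro rare hmem hpw hnd hdisj
    rw [List.foldl_cons]
    have hq : jp.2 ∈ players := by
      have := List.mem_map_of_mem (f := Prod.snd) (hmem jp List.mem_cons_self)
      rwa [PySem.List.map_snd_enumerate] at this
    have hrn : (uraResid players jp.1 jp.2).Nodup := (h _ hq).filter _
    have hdisj1 : ∀ x ∈ uraResid players jp.1 jp.2, x ∉ rare :=
      fun x hx hxr => hdisj x hxr jp List.mem_cons_self hx
    have hu : PySem.Set.union rare (uraResid players jp.1 jp.2)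
        = rare ++ uraResid players jp.1 jp.2 :=
      PySem.Set.update_eq_append_of_disjoint _ _ hrn hdisj1
    rw [hu, ih (rare ++ uraResid players jp.1 jp.2)
      (fun jq hjq => hmem jq (List.mem_cons_of_mem _ hjq))
      hpw.of_cons
      (List.Nodup.append hnd hrn (fun x hx => hdisj x hx jp List.mem_cons_self))
      ?_]
    · rw [List.flatMap_cons, List.append_assoc]
    · intro x hx jq hjq
      rcases List.mem_append.mp hx with hx' | hx'
      · exact hdisj x hx' jq (List.mem_cons_of_mem _ hjq)
      · exact ura_resid_disjoint players jp.1 jq.1 jp.2 jq.2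
          (hmem jq (List.mem_cons_of_mem _ hjq))
          ((List.pairwise_cons.mp hpw).1 jq hjq) x hx'

theorem ura_count_aux :
    ∀ (L : List (List String)) (s j : Int) (q : List String) (x : String),
    (∀ p ∈ L, p.Nodup) → (j, q) ∈ PySem.List.enumerate L s → x ∈ q →
    ((PySem.List.enumerate L s).all (fun jq => j == jq.1 || !(PySem.Set.contains jq.2 x))
      = (L.flatten.count x == 1)) := by
  intro L
  induction L with
  | nil => intro s j q x _ hmem _; simp [PySem.List.enumerate_nil] at hmem
  | cons q0 rest ih =>
    intro s j q x h hmem hx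
    rw [PySem.List.enumerate_cons] at hmem ⊢
    rcases List.mem_cons.mp hmem with heq | htail
    · obtain ⟨hj, hq⟩ : j = s ∧ q = q0 := by
        constructor <;> [exact congrArg Prod.fst heq; exact congrArg Prod.snd heq]
      subst hj; subst hq
      rw [List.all_cons]
      have h1 : (j == j) = true := by simp
      rw [h1, Bool.true_or, Bool.true_and]
      have hidx : ∀ kr ∈ PySem.List.enumerate rest (j + 1), (j == kr.1) = false := by
        intro kr hkr
        obtain ⟨k, hk, hkr⟩ := (PySem.List.mem_enumerate_iff rest (j+1) kr).mp hkr
        subst hkr; simp; omega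
      have hcnt0 : q.count x = 1 := List.count_eq_one_of_mem (h q List.mem_cons_self) hx
      rw [Bool.eq_iff_iff, List.all_eq_true, List.flatten_cons, List.count_append, hcnt0]
      simp only [beq_iff_eq]
      constructor
      · intro hall
        have : rest.flatten.count x = 0 := by
          rw [List.count_eq_zero]
          intro hmemf
          obtain ⟨r, hr, hxr⟩ := List.mem_flatten.mp hmemf
          obtain ⟨k, hk, hkq⟩ := List.getElem_of_mem hr
          have hkr : ((j + 1 + (k : Int)), r) ∈ PySem.List.enumerate rest (j+1) := by
            rw [PySem.List.mem_enumerate_iff]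
            exact ⟨k, hk, by rw [hkq]⟩
          have h5 := hall _ hkr
          rw [hidx _ hkr, Bool.false_or] at h5
          exact absurd hxr (by simpa using h5)
        omega
      · intro hone kr hkr
        rw [hidx _ hkr, Bool.false_or]
        have hc0 : rest.flatten.count x = 0 := by omega
        have hkrm : kr.2 ∈ rest := by
          have := List.mem_map_of_mem (f := Prod.snd) hkr
          rwa [PySem.List.map_snd_enumerate] at this
        have hxn : x ∉ kr.2 := by
          intro hxk
          have := List.count_pos_iff.mpr (List.mem_flatten.mpr ⟨kr.2, hkrm, hxk⟩)
          omega
        simpa using hxn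
    · have hics := ih (s+1) j q x (fun p hp => h p (List.mem_cons_of_mem _ hp)) htail hx
      rw [List.all_cons, hics]
      have hqrest : q ∈ rest := by
        have := List.mem_map_of_mem (f := Prod.snd) htail
        rwa [PySem.List.map_snd_enumerate] at this
      have hjne : (j == s) = false := by
        obtain ⟨k, hk, hkr⟩ := (PySem.List.mem_enumerate_iff rest (s+1) (j, q)).mp htail
        have : j = s + 1 + (k : Int) := congrArg Prod.fst hkr
        simp [this]; omega
      rw [hjne, Bool.false_or, List.flatten_cons, List.count_append]
      have hrge : 0 < rest.flatten.count x :=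
        List.count_pos_iff.mpr (List.mem_flatten.mpr ⟨q, hqrest, hx⟩)
      by_cases hx0 : x ∈ q0
      · have : q0.count x = 1 := List.count_eq_one_of_mem (h q0 List.mem_cons_self) hx0
        rw [this]
        have hcon : (q0.contains x) = true := by simpa using hx0
        rw [Bool.eq_iff_iff]
        simp only [Bool.and_eq_true, Bool.not_true,
          PySem.Set.contains_eq_listContains, hcon, beq_iff_eq, Bool.false_eq_true,
          false_and, false_iff]
        omega
      · have : q0.count x = 0 := List.count_eq_zero.mpr hx0
        rw [this]
        have hcon : (q0.contains x) = false := by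
          rw [← Bool.not_eq_true]; simpa using hx0
        simp [PySem.Set.contains_eq_listContains, hcon]
        exact fun _ => hx0

theorem ura_filter_flatten {α : Type} (L : List (List α)) (p : α → Bool) :
    L.flatten.filter p = L.flatMap (fun l => l.filter p) := by
  induction L with
  | nil => simp
  | cons a L ih => simp [List.filter_append, ih]

theorem a_eq_target (players : List (List String))
    (h : ∀ p ∈ players, p.Nodup) :
    ultra_rare_achs players = uraTarget players := by
  have hbody : ultra_rare_achs players
      = (PySem.List.enumerate players 0).foldl
          (fun rare ip => PySem.Set.union rare (uraResid players ip.1 ip.2))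
          PySem.Set.empty := by
    rw [ultra_rare_achs]
    congr 1
    funext rare ip
    rw [ura_inner_fold players ip.1 _ ip.2]
    rfl
  rw [hbody, ura_outer_fold players h (PySem.List.enumerate players 0) PySem.Set.empty
      (fun _ hm => hm)
      ((PySem.List.pairwise_lt_enumerate players 0).imp (fun hlt => ne_of_lt hlt))
      List.nodup_nil
      (by intro x hx; simp [PySem.Set.empty] at hx)]
  rw [show (PySem.Set.empty : PySem.Set String) = [] from rfl, List.nil_append]
  rw [uraTarget, ura_filter_flatten]
  set pc : String → Bool := fun x => players.flatten.count x == 1 with hpc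
  have hmapped : players.flatMap (fun q => q.filter pc)
      = (PySem.List.enumerate players 0).flatMap (fun jq => jq.2.filter pc) := by
    conv_lhs => rw [← PySem.List.map_snd_enumerate players 0]
    rw [List.flatMap_map]
  rw [hmapped]
  rw [List.flatMap, List.flatMap]
  congr 1
  apply List.map_congr_left
  intro jq hjq
  apply List.filter_congr
  intro x hx
  have hcx := ura_count_aux players 0 jq.1 jq.2 x h (by simpa using hjq) hx
  show uraPred players jq.1 x = pc x
  rw [hpc]
  simp only []
  rw [← hcx]
  rfl

-- ===== VERDICT (by name: the statement is the Claim_ definition above) =====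
theorem ultra_rare_achs_spec : Claim_equal_ultra_rare_achs := by
  intro players _ hpre
  unfold Spec_ultra_rare_achs
  rw [a_eq_target players hpre, alt_eq_target players]
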